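-- pv_equiv track=rewrite | github.com/HYL-Dave/WebNovelCrawler | advanced_decoder.py | shift_unicode
-- ===== SOURCE A (Python) =====
-- def shift_unicode(text: str, shift: int) -> str:
--     """Unicode 字符位移"""
--     result = []
--     for char in text:
--         code = ord(char)
--         new_code = code + shift
--
--         # 確保在有效的 Unicode 範圍內
--         if 0 <= new_code <= 0x10FFFF:
--             result.append(chr(new_code))
--         else:
--             result.append(char)
--
--     return ''.join(result)
-- ===== SOURCE B (Python) =====
-- def shift_unicode(text: str, shift: int) -> str:
--     """Unicode 字符位移 — build a translation table from the distinct chars, then translate."""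
--     table = {}
--     for c in set(text):
--         nc = ord(c) + shift
--         table[ord(c)] = nc if 0 <= nc <= 0x10FFFF else ord(c)
--     return text.translate(table)
-- ===== Notes on version B (the rewrite author's own statement) =====
-- stated objective: faster
-- what changed: Replaces A's explicit per-character append loop by building an ord-to-ord translation table over the distinct characters once and returning text.translate(table) in a single C-level library pass.
import Mathlib
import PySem

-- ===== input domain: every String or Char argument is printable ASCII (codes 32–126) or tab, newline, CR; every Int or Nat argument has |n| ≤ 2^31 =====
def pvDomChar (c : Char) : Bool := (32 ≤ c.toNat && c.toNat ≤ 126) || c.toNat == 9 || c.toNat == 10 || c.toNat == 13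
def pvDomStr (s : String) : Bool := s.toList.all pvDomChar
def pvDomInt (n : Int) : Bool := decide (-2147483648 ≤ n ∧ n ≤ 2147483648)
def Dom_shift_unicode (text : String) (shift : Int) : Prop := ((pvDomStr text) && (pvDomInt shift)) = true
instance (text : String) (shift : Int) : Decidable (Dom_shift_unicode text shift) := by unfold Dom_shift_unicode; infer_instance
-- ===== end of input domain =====

-- B replaces A's per-char append loop by building a translation table over the distinct
-- characters once and mapping each character through it (idiomatic str.translate decomposition).

-- ===== PORT A =====
-- literal port of A: accumulate result list char by char, join at the end
def shift_unicode (text : String) (shift : Int) : String :=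
  String.ofList (text.toList.foldl (fun result char =>
    let code : Int := (char.toNat : Int)
    let new_code : Int := code + shift
    if 0 ≤ new_code ∧ new_code ≤ 0x10FFFF then result ++ [Char.ofNat new_code.toNat]
    else result ++ [char]) [])

-- ===== PORT B =====
-- shifted ordinal for one table entry (the dict value in Source B)
def pvShiftCode (shift : Int) (code : Nat) : Nat :=
  let nc : Int := (code : Int) + shift
  if 0 ≤ nc ∧ nc ≤ 0x10FFFF then nc.toNat else code

-- port of B: build the ord→ord table from set(text), then translate (chars absent from
-- the table stay unchanged, modelled by the getD fallback; exact since every char of text is a key)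
def shift_unicode_alt (text : String) (shift : Int) : String :=
  let table : PySem.Dict Nat Nat :=
    (PySem.Set.ofList text.toList).foldl
      (fun d c => d.insert c.toNat (pvShiftCode shift c.toNat)) PySem.Dict.empty
  String.ofList (text.toList.map (fun c => Char.ofNat (table.getD c.toNat c.toNat)))

-- ===== PRECONDITION & SPEC =====
-- Pre_ excludes inputs where some character's shifted code point lands in the surrogate
-- range 0xD800–0xDFFF: there Python's chr() returns a surrogate character that is not a
-- valid Lean Char, so neither Python value is representable under the type convention.
def Pre_shift_unicode (text : String) (shift : Int) : Prop :=
  (text.toList.all fun c =>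
    !(55296 ≤ (c.toNat : Int) + shift && (c.toNat : Int) + shift ≤ 57343)) = true
instance (text : String) (shift : Int) : Decidable (Pre_shift_unicode text shift) := by
  unfold Pre_shift_unicode; infer_instance

def pvWitness_shift_unicode : String × Int := ("ab", 3)

def Spec_shift_unicode (text : String) (shift : Int) (out : String) : Prop := out = shift_unicode_alt text shift
instance (text : String) (shift : Int) (out : String) : Decidable (Spec_shift_unicode text shift out) := by unfold Spec_shift_unicode; infer_instance

-- ===== CLAIM (what is proved, stated in full; the proofs are below) =====
def Claim_equal_shift_unicode : Prop := ∀ (text : String) (shift : Int), Dom_shift_unicode text shift → Pre_shift_unicode text shift → Spec_shift_unicode text shift (shift_unicode text shift)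

-- ===== LEMMAS AND PROOFS =====

-- looking up a key of a fold-built table whose values depend only on the key
theorem pv_getD_foldl_insert_key (g : Nat → Nat) (l : List Char) (d : PySem.Dict Nat Nat)
    (k dflt : Nat) :
    (l.foldl (fun d c => d.insert c.toNat (g c.toNat)) d).getD k dflt =
      if k ∈ l.map Char.toNat then g k else d.getD k dflt := by
  induction l generalizing d with
  | nil => simp
  | cons c l ih =>
    simp only [List.foldl_cons, ih, List.map_cons, List.mem_cons]
    rw [PySem.Dict.getD_insert]
    by_cases hk : k = c.toNat
    · subst hk; simp
    · simp [hk]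

theorem pv_alt_char (text : String) (shift : Int) (c : Char) (hc : c ∈ text.toList) :
    ((PySem.Set.ofList text.toList).foldl
      (fun d c => d.insert c.toNat (pvShiftCode shift c.toNat)) PySem.Dict.empty).getD c.toNat c.toNat
      = pvShiftCode shift c.toNat := by
  rw [pv_getD_foldl_insert_key]
  have : c ∈ PySem.Set.ofList text.toList := by
    simpa [PySem.Set.mem_ofList] using hc
  rw [if_pos (List.mem_map_of_mem this)]

-- A's loop, as accumulator-append over the list
theorem pv_foldA (shift : Int) (l acc : List Char) :
    l.foldl (fun result char =>
      let code : Int := (char.toNat : Int)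
      let new_code : Int := code + shift
      if 0 ≤ new_code ∧ new_code ≤ 0x10FFFF then result ++ [Char.ofNat new_code.toNat]
      else result ++ [char]) acc
    = acc ++ l.map (fun char =>
        if 0 ≤ (char.toNat : Int) + shift ∧ (char.toNat : Int) + shift ≤ 0x10FFFF
        then Char.ofNat ((char.toNat : Int) + shift).toNat else char) := by
  induction l generalizing acc with
  | nil => simp
  | cons c l ih => simp only [List.foldl_cons, List.map_cons, ih]; split_ifs <;> simp

theorem shift_unicode_spec : Claim_equal_shift_unicode := by
  intro text shift _hdom hpre
  unfold Spec_shift_unicode shift_unicode shift_unicode_alt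
  rw [pv_foldA]
  simp only [List.nil_append]
  congr 1
  apply List.map_congr_left
  intro c hc
  rw [pv_alt_char text shift c hc]
  unfold pvShiftCode
  by_cases h : 0 ≤ (c.toNat : Int) + shift ∧ (c.toNat : Int) + shift ≤ 0x10FFFF
  · simp [h]
  · simp [h, Char.ofNat_toNat]
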